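-- pv_equiv track=rewrite | github.com/max-okeeffe/AdventOfCode | 2025/part1.py | joltage
-- ===== SOURCE A (Python) =====
-- def joltage(bank):
--     left, right = bank[0], bank[1]
--     N = len(bank)
--
--     for i in range(1, N-1):
--         curr = bank[i]
--         if curr > left:
--             left = curr
--             right = bank[i+1]
--         elif curr > right:
--             right = curr
--
--     if bank[N-1] > right:
--         right = bank[N-1]
--
--     return int(left + right)
-- ===== SOURCE B (Python) =====
-- def joltage(bank):
--     M = max(bank[:-1])
--     p = bank.index(M)
--     return int(M + max(bank[p+1:]))
-- ===== Notes on version B (the rewrite author's own statement) =====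
-- stated objective: simpler
-- what changed: A's single stateful pass maintaining a coupled (left, right) pair with in-loop index reads and a trailing fix-up is replaced by a three-step decomposition: M = max(bank[:-1]), p = bank.index(M), answer = M + max(bank[p+1:]).
import Mathlib
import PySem

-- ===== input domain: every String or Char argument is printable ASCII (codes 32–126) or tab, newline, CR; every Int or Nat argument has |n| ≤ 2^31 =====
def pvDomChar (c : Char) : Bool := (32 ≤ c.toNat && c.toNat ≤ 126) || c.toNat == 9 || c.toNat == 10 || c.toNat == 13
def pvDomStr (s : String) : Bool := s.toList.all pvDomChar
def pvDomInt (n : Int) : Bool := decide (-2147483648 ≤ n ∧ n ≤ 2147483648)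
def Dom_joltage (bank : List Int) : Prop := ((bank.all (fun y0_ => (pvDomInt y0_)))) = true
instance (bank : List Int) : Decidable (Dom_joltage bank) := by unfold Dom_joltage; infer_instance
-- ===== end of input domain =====

-- B replaces A's coupled stateful (left, right) scan by the plain decomposition
-- max-of-prefix / index-of-max / max-of-suffix; same O(n) cost, simpler to read.

-- ===== PORT A =====
-- transliteration of A: indices via pyRange, element access via pyGetD
-- (in range for every access whenever Pre_joltage holds, exactly where Python does not raise)
def joltage (bank : List Int) : Int :=
  let left := PySem.List.pyGetD bank 0 0
  let right := PySem.List.pyGetD bank 1 0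
  let N : Int := bank.length
  let s := (PySem.List.pyRange 1 (N - 1) 1).foldl
    (fun (s : Int × Int) (i : Int) =>
      let curr := PySem.List.pyGetD bank i 0
      if curr > s.1 then (curr, PySem.List.pyGetD bank (i + 1) 0)
      else if curr > s.2 then (s.1, curr)
      else s)
    (left, right)
  let right' := if PySem.List.pyGetD bank (N - 1) 0 > s.2 then PySem.List.pyGetD bank (N - 1) 0 else s.2
  s.1 + right'

-- ===== PORT B =====
-- transliteration of Source B: M = max(bank[:-1]); p = bank.index(M); M + max(bank[p+1:])
def joltage_alt (bank : List Int) : Int :=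
  let M := (PySem.List.max? (PySem.List.slice bank none (some (-1))) (fun x => x)).getD 0
  let p : Nat := (PySem.List.index? bank M).getD 0
  let r := (PySem.List.max? (PySem.List.slice bank (some ((p : Int) + 1)) none) (fun x => x)).getD 0
  M + r

-- ===== PRECONDITION & SPEC =====
-- Pre_ excludes exactly the inputs on which A raises (len(bank) < 2: IndexError on bank[0]/bank[1]).
def Pre_joltage (bank : List Int) : Prop := 2 ≤ bank.length
instance (bank : List Int) : Decidable (Pre_joltage bank) := by unfold Pre_joltage; infer_instance

def pvWitness_joltage : List Int := [3, 1, 2]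

def Spec_joltage (bank : List Int) (out : Int) : Prop := out = joltage_alt bank
instance (bank : List Int) (out : Int) : Decidable (Spec_joltage bank out) := by unfold Spec_joltage; infer_instance

-- ===== CLAIM (what is proved, stated in full; the proofs are below) =====
def Claim_equal_joltage : Prop := ∀ (bank : List Int), Dom_joltage bank → Pre_joltage bank → Spec_joltage bank (joltage bank)

-- ===== LEMMAS AND PROOFS =====

-- A's loop, rephrased on the list of remaining elements bank[i:] (each step reads the head
-- and, on a left-update, the next element; it stops with one element left).
def goJ : Int → Int → List Int → Int × Int
  | l, r, [] => (l, r)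
  | l, r, [_] => (l, r)
  | l, r, c :: x :: t =>
      if c > l then goJ c x (x :: t)
      else if c > r then goJ l c (x :: t)
      else goJ l r (x :: t)

-- max of a nonempty list (0 on [], never used there)
def pmax : List Int → Int
  | [] => 0
  | y :: ys => ys.foldl max y

-- the value of A's right accumulator after the loop AND the final bank[N-1] comparison
def rSpec (l r : Int) (zs : List Int) : Int :=
  let M := zs.dropLast.foldl max l
  if M ≤ l then zs.foldl max r
  else pmax (zs.drop ((PySem.List.index? zs.dropLast M).getD 0 + 1))

lemma foldl_max_mem : ∀ (L : List Int) (a : Int), L.foldl max a = a ∨ L.foldl max a ∈ L := by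
  intro L
  induction L with
  | nil => intro a; left; rfl
  | cons b L ih =>
      intro a
      rcases ih (max a b) with h | h
      · rcases max_choice a b with hm | hm
        · left; simpa [hm] using h
        · right; simp only [List.foldl_cons]
          rw [h, hm]; exact List.mem_cons_self
      · right; simp only [List.foldl_cons]
        exact List.mem_cons_of_mem _ h

lemma foldl_pyRange_eq_goJ (bank : List Int) :
    ∀ (zs : List Int) (ki : Int) (k : Nat) (l r : Int), ki = (k : Int) → bank.drop k = zs →
      (PySem.List.pyRange ki ((bank.length : Int) - 1) 1).foldl
        (fun (s : Int × Int) (i : Int) =>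
          if PySem.List.pyGetD bank i 0 > s.1 then
            (PySem.List.pyGetD bank i 0, PySem.List.pyGetD bank (i + 1) 0)
          else if PySem.List.pyGetD bank i 0 > s.2 then (s.1, PySem.List.pyGetD bank i 0)
          else s)
        (l, r)
      = goJ l r zs := by
  intro zs
  induction zs with
  | nil =>
      intro ki k l r hki hk
      subst hki
      have hlen : bank.length ≤ k := by
        have := congrArg List.length hk
        simp [List.length_drop] at this
        omega
      rw [PySem.List.pyRange_one_eq_nil (by omega)]
      rfl
  | cons c rest ih =>
      intro ki k l r hki hk
      subst hki
      have hlen : bank.length - k = rest.length + 1 := by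
        have := congrArg List.length hk
        simpa [List.length_drop] using this
      have hkl : k < bank.length := by omega
      have hgetc : PySem.List.pyGetD bank (k : Int) 0 = c := by
        rw [PySem.List.pyGetD_natCast]
        have h0 : bank[k]? = some c := by
          have := List.getElem?_drop (xs := bank) (i := k) (j := 0)
          rw [hk] at this
          simpa using this.symm
        simp [List.getD, h0]
      cases rest with
      | nil =>
          have hle : bank.length = k + 1 := by
            simp at hlen; omega
          rw [PySem.List.pyRange_one_eq_nil (by rw [hle]; push_cast; omega)]
          rfl
      | cons x t =>
          have hdrop : bank.drop (k + 1) = x :: t := by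
            have := congrArg List.tail hk
            simpa [List.tail_drop] using this
          have hgetx : PySem.List.pyGetD bank ((k : Int) + 1) 0 = x := by
            rw [show ((k : Int) + 1) = ((k + 1 : Nat) : Int) from by push_cast; ring,
              PySem.List.pyGetD_natCast]
            have h0 : bank[k + 1]? = some x := by
              have := List.getElem?_drop (xs := bank) (i := k + 1) (j := 0)
              rw [hdrop] at this
              simpa using this.symm
            simp [List.getD, h0]
          have hk2 : (k : Int) < (bank.length : Int) - 1 := by
            have := congrArg List.length hk
            simp [List.length_drop] at this
            omega
          rw [PySem.List.pyRange_one_cons hk2, List.foldl_cons]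
          simp only [hgetc, hgetx]
          by_cases h1 : c > l
          · simp only [h1, if_pos]
            rw [ih ((k : Int) + 1) (k + 1) c x (by push_cast; ring) hdrop]
            simp [goJ, h1]
          · by_cases h2 : c > r
            · simp only [h1, h2, if_pos, if_false]
              rw [ih ((k : Int) + 1) (k + 1) l c (by push_cast; ring) hdrop]
              simp [goJ, h1, h2]
            · simp only [h1, h2, if_false]
              rw [ih ((k : Int) + 1) (k + 1) l r (by push_cast; ring) hdrop]
              simp [goJ, h1, h2]

lemma rSpec_step (c x l r : Int) (t' : List Int) :
    rSpec l r (c :: x :: t') =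
      if c > l then rSpec c x (x :: t')
      else if c > r then rSpec l c (x :: t')
      else rSpec l r (x :: t') := by
  have hne : (x :: t') ≠ ([] : List Int) := by simp
  have hdl : (c :: x :: t').dropLast = c :: (x :: t').dropLast := List.dropLast_cons_of_ne_nil hne
  set D := (x :: t').dropLast with hD
  by_cases h1 : c > l
  · have hlc : max l c = c := max_eq_right h1.le
    have hcM : c ≤ D.foldl max c := (PySem.List.le_foldl_max D c).1
    rw [if_pos h1]
    simp only [rSpec, hdl, List.foldl_cons, hlc, ← hD]
    by_cases hMc : D.foldl max c = c
    · rw [hMc]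
      rw [if_neg (by omega), if_pos le_rfl, PySem.List.index?_cons_self]
      simp [pmax]
    · have hmem : D.foldl max c ∈ D := (foldl_max_mem D c).resolve_left hMc
      obtain ⟨j, hj⟩ := Option.isSome_iff_exists.mp ((PySem.List.index?_isSome_iff D (D.foldl max c)).2 hmem)
      rw [if_neg (by omega), if_neg (by omega)]
      rw [PySem.List.index?_cons_of_ne D (fun h => hMc h.symm), hj]
      simp only [Option.map_some, Option.getD_some, List.drop_succ_cons]
  · have hlc : max l c = l := max_eq_left (not_lt.mp h1)
    rw [if_neg h1]
    by_cases h2 : c > r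
    · rw [if_pos h2]
      simp only [rSpec, hdl, List.foldl_cons, hlc, ← hD]
      by_cases hMl : D.foldl max l ≤ l
      · rw [if_pos hMl, if_pos hMl]
        simp [max_eq_right h2.le]
      · have hlM : l ≤ D.foldl max l := (PySem.List.le_foldl_max D l).1
        have hmem : D.foldl max l ∈ D :=
          (foldl_max_mem D l).resolve_left (fun h => hMl (le_of_eq h))
        obtain ⟨j, hj⟩ := Option.isSome_iff_exists.mp ((PySem.List.index?_isSome_iff D (D.foldl max l)).2 hmem)
        have hcne : c ≠ D.foldl max l := by omega
        rw [if_neg hMl, if_neg hMl]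
        rw [PySem.List.index?_cons_of_ne D hcne, hj]
        simp only [Option.map_some, Option.getD_some, List.drop_succ_cons]
    · rw [if_neg h2]
      simp only [rSpec, hdl, List.foldl_cons, hlc, ← hD]
      by_cases hMl : D.foldl max l ≤ l
      · rw [if_pos hMl, if_pos hMl]
        simp [max_eq_left (not_lt.mp h2)]
      · have hlM : l ≤ D.foldl max l := (PySem.List.le_foldl_max D l).1
        have hmem : D.foldl max l ∈ D :=
          (foldl_max_mem D l).resolve_left (fun h => hMl (le_of_eq h))
        obtain ⟨j, hj⟩ := Option.isSome_iff_exists.mp ((PySem.List.index?_isSome_iff D (D.foldl max l)).2 hmem)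
        have hcne : c ≠ D.foldl max l := by omega
        rw [if_neg hMl, if_neg hMl]
        rw [PySem.List.index?_cons_of_ne D hcne, hj]
        simp only [Option.map_some, Option.getD_some, List.drop_succ_cons]

lemma goJ_fin : ∀ (t : List Int) (c l r : Int),
    (goJ l r (c :: t)).1 = (c :: t).dropLast.foldl max l ∧
    max (goJ l r (c :: t)).2 ((c :: t).getLastD 0) = rSpec l r (c :: t) := by
  intro t
  induction t with
  | nil =>
      intro c l r
      constructor
      · rfl
      · simp [goJ, rSpec]
  | cons x t' ih =>
      intro c l r
      have hne : (x :: t') ≠ ([] : List Int) := by simp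
      have hdl : (c :: x :: t').dropLast = c :: (x :: t').dropLast := List.dropLast_cons_of_ne_nil hne
      have hlast : (c :: x :: t').getLastD 0 = (x :: t').getLastD 0 := by simp
      constructor
      · by_cases h1 : c > l
        · rw [show goJ l r (c :: x :: t') = goJ c x (x :: t') from by simp [goJ, h1]]
          rw [(ih x c x).1, hdl, List.foldl_cons, max_eq_right h1.le]
        · by_cases h2 : c > r
          · rw [show goJ l r (c :: x :: t') = goJ l c (x :: t') from by simp [goJ, h1, h2]]
            rw [(ih x l c).1, hdl, List.foldl_cons, max_eq_left (not_lt.mp h1)]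
          · rw [show goJ l r (c :: x :: t') = goJ l r (x :: t') from by simp [goJ, h1, h2]]
            rw [(ih x l r).1, hdl, List.foldl_cons, max_eq_left (not_lt.mp h1)]
      · rw [rSpec_step, hlast]
        by_cases h1 : c > l
        · rw [show goJ l r (c :: x :: t') = goJ c x (x :: t') from by simp [goJ, h1]]
          rw [if_pos h1]
          exact (ih x c x).2
        · by_cases h2 : c > r
          · rw [show goJ l r (c :: x :: t') = goJ l c (x :: t') from by simp [goJ, h1, h2]]
            rw [if_neg h1, if_pos h2]
            exact (ih x l c).2
          · rw [show goJ l r (c :: x :: t') = goJ l r (x :: t') from by simp [goJ, h1, h2]]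
            rw [if_neg h1, if_neg h2]
            exact (ih x l r).2

lemma max_if (a b : Int) : (if b > a then b else a) = max a b := by
  split_ifs <;> omega

lemma joltage_eq (b0 z0 : Int) (zt : List Int) :
    joltage (b0 :: z0 :: zt) =
      (z0 :: zt).dropLast.foldl max b0 + rSpec b0 z0 (z0 :: zt) := by
  have hfold := foldl_pyRange_eq_goJ (b0 :: z0 :: zt) (z0 :: zt) (1 : Int) 1 b0 z0 (by norm_num) rfl
  have hget1 : PySem.List.pyGetD (b0 :: z0 :: zt) (1 : Int) 0 = z0 := by
    rw [show (1 : Int) = ((1 : Nat) : Int) from rfl, PySem.List.pyGetD_natCast]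
    rfl
  have hlastget : PySem.List.pyGetD (b0 :: z0 :: zt) (((b0 :: z0 :: zt).length : Int) - 1) 0
      = (z0 :: zt).getLastD 0 := by
    rw [show (((b0 :: z0 :: zt).length : Int) - 1) = ((zt.length + 1 : Nat) : Int) from by
      push_cast [List.length_cons]; ring]
    rw [PySem.List.pyGetD_natCast, List.getD_cons_succ]
    simp [List.getD, List.getLastD_eq_getLast?, List.getLast?_eq_getElem?]
  simp only [joltage, PySem.List.pyGetD_zero_cons, hget1, hlastget, max_if]
  rw [hfold, (goJ_fin zt z0 b0 z0).1, (goJ_fin zt z0 b0 z0).2]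

lemma joltage_alt_eq (b0 z0 : Int) (zt : List Int) :
    joltage_alt (b0 :: z0 :: zt) =
      (z0 :: zt).dropLast.foldl max b0 + rSpec b0 z0 (z0 :: zt) := by
  have hne : (z0 :: zt) ≠ ([] : List Int) := by simp
  have hdlbank : (b0 :: z0 :: zt).dropLast = b0 :: (z0 :: zt).dropLast :=
    List.dropLast_cons_of_ne_nil hne
  have hMB : (PySem.List.max? (PySem.List.slice (b0 :: z0 :: zt) none (some (-1))) (fun x => x)).getD 0
      = (z0 :: zt).dropLast.foldl max b0 := by
    rw [PySem.List.slice_to_neg_one, hdlbank, PySem.List.max?_id_cons]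
    rfl
  set M := (z0 :: zt).dropLast.foldl max b0 with hM
  have hbM : b0 ≤ M := (PySem.List.le_foldl_max _ b0).1
  by_cases hMle : M ≤ b0
  · have hMb : M = b0 := le_antisymm hMle hbM
    have hidx : PySem.List.index? (b0 :: z0 :: zt) M = some 0 := by
      rw [hMb]; exact PySem.List.index?_cons_self b0 (z0 :: zt)
    simp only [joltage_alt, hMB, hidx, Option.getD_some]
    rw [show (((0 : Nat) : Int) + 1) = (1 : Int) from by norm_num, PySem.List.slice_from_one]
    rw [show (b0 :: z0 :: zt).tail = z0 :: zt from rfl, PySem.List.max?_id_cons, Option.getD_some]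
    simp only [rSpec]
    rw [← hM, if_pos hMle]
    simp [List.foldl_cons, max_self]
  · have hMne : M ≠ b0 := by omega
    have hmem : M ∈ (z0 :: zt).dropLast := (foldl_max_mem _ b0).resolve_left hMne
    obtain ⟨j, hj⟩ := Option.isSome_iff_exists.mp
      ((PySem.List.index?_isSome_iff (z0 :: zt).dropLast M).2 hmem)
    have hidx : PySem.List.index? (b0 :: z0 :: zt) M = some (j + 1) := by
      rw [PySem.List.index?_cons_of_ne (z0 :: zt) (fun h => hMne h.symm)]
      conv_lhs => rw [← List.dropLast_append_getLast hne]
      rw [PySem.List.index?_append_of_mem _ hmem, hj]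
      rfl
    have hjlt : j < (z0 :: zt).dropLast.length := by
      obtain ⟨pre, suf, hxs, hlenp, -⟩ := (PySem.List.index?_eq_some_iff _ _ _).mp hj
      rw [hxs]
      simp [← hlenp]
    have hdropne : (z0 :: zt).drop (j + 1) ≠ [] := by
      have hlen : ((z0 :: zt).drop (j + 1)).length = zt.length - j := by simp [List.length_drop]
      intro hcon
      rw [hcon] at hlen
      simp at hlen
      simp at hjlt
      omega
    obtain ⟨y, ys, hys⟩ := List.exists_cons_of_ne_nil hdropne
    simp only [joltage_alt, hMB, hidx, Option.getD_some]
    rw [show (((j + 1 : Nat) : Int) + 1) = ((j + 2 : Nat) : Int) from by push_cast; ring]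
    rw [PySem.List.slice_from_natCast]
    rw [show (b0 :: z0 :: zt).drop (j + 2) = (z0 :: zt).drop (j + 1) from List.drop_succ_cons]
    rw [hys, PySem.List.max?_id_cons, Option.getD_some]
    simp only [rSpec]
    rw [← hM, if_neg hMle, hj, Option.getD_some, hys]
    rfl

-- ===== VERDICT (by name: the statement is the Claim_ definition above) =====
theorem joltage_spec : Claim_equal_joltage := by
  unfold Claim_equal_joltage
  intro bank _ hpre
  unfold Spec_joltage
  match bank, hpre with
  | b0 :: z0 :: zt, _ => rw [joltage_eq, joltage_alt_eq]
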